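-- pv_equiv track=rewrite | github.com/cassimpatel/advent-of-code-2021 | solutions.py | day10
-- ===== SOURCE A (Python) =====
-- def day10(part, input):
--   def corruptedScore(line):
--     pairs = {"(":")", "[":"]", "{":"}", "<":">"}
--     scores = {")":3, "]":57, "}":1197, ">":25137}
--     stack = []
--     for c in line:
--       if c in pairs.keys(): stack.append(c)
--       elif c != pairs[stack.pop()]: return scores[c]
--     return 0
--   def completionScore(line):
--     pairs = {"(":")", "[":"]", "{":"}", "<":">"}
--     scores = {")":1, "]":2, "}":3, ">":4}
--     stack = []
--     for c in line:
--       if c in pairs.keys(): stack.append(c)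
--       else: stack.pop()
--     score = 0
--     while (len(stack) > 0):
--       score = score*5 + scores[pairs[stack.pop()]]
--     return score
--   def part1(input):
--     return sum([corruptedScore(x) for x in input])
--   def part2(input):
--     input = [x for x in input if corruptedScore(x) == 0]
--     scores = sorted([completionScore(x) for x in input])
--     return scores[int((len(scores)-1)/2)]
--   input = input.split("\n")
--   if part == 1: return part1(input)
--   elif part == 2: return part2(input)
-- ===== SOURCE B (Python) =====
-- def day10(part, input):
--   CLOSE = {"(": ")", "[": "]", "{": "}", "<": ">"}
--   CORRUPT = {")": 3, "]": 57, "}": 1197, ">": 25137}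
--   COMPLETE = {")": 1, "]": 2, "}": 3, ">": 4}
--
--   def seq(line, i):
--     # Recursive-descent parser: consume a maximal sequence of chunks starting at i.
--     # Returns ('stop', j)       - stopped in front of index j (end of line or an
--     #                             unconsumed closer belonging to an enclosing chunk),
--     #         ('corrupt', s)    - first illegal closer found, with its corruption score,
--     #         ('incomplete', c) - end of line hit inside a chunk; c is the completion
--     #                             score of the closers still needed (innermost first).
--     while i < len(line) and line[i] in CLOSE:
--       need = CLOSE[line[i]]
--       r = seq(line, i + 1)          # consume the chunk's inside
--       if r[0] == 'incomplete':
--         return ('incomplete', r[1] * 5 + COMPLETE[need])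
--       if r[0] == 'corrupt':
--         return r
--       j = r[1]
--       if j == len(line):
--         return ('incomplete', COMPLETE[need])
--       if line[j] != need:
--         return ('corrupt', CORRUPT.get(line[j], 0))
--       i = j + 1                     # chunk closed; continue with its siblings
--     return ('stop', i)
--
--   def analyze(line):
--     # -> (corruption score (0 if none), completion score (0 if complete/corrupt))
--     r = seq(line, 0)
--     if r[0] == 'corrupt':
--       return (r[1], 0)
--     if r[0] == 'incomplete':
--       return (0, r[1])
--     j = r[1]
--     if j < len(line):               # stray closer at top level: corrupt
--       return (CORRUPT.get(line[j], 0), 0)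
--     return (0, 0)
--
--   lines = input.split("\n")
--   if part == 1:
--     return sum(analyze(l)[0] for l in lines)
--   if part == 2:
--     comps = sorted(c for (k, c) in map(analyze, lines) if k == 0)
--     return comps[(len(comps) - 1) // 2]
-- ===== Notes on version B (the rewrite author's own statement) =====
-- stated objective: alternative
-- what changed: Replaces A's per-line explicit-stack scans (a corruption scan plus, for part 2, a second full scan rebuilding the stack for the completion score) with a single recursive-descent parse per line that consumes nested chunks and reports either the first illegal closer's corruption score or the completion score built innermost-first while unwinding.
import Mathlib
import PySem

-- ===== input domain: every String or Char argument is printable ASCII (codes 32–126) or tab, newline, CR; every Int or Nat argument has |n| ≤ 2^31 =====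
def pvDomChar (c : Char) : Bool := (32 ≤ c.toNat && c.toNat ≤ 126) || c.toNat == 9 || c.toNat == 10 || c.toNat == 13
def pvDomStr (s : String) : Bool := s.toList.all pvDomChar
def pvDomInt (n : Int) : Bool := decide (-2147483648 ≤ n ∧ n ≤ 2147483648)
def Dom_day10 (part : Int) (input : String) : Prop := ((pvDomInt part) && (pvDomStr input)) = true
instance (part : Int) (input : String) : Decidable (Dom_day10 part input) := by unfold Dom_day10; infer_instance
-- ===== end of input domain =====

-- B replaces A's two explicit-stack scans per line by a single recursive-descent parse
-- per line (objective: alternative decomposition; equivalence of the return value).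

-- shared bracket tables (Python's dict literals as functions)
def isOpenB (c : Char) : Bool := c = '(' || c = '[' || c = '{' || c = '<'
def isCloseB (c : Char) : Bool := c = ')' || c = ']' || c = '}' || c = '>'
def pairsF (c : Char) : Char :=
  if c = '(' then ')' else if c = '[' then ']' else if c = '{' then '}' else if c = '<' then '>' else '?'
def corrScoreF (c : Char) : Int :=
  if c = ')' then 3 else if c = ']' then 57 else if c = '}' then 1197 else if c = '>' then 25137 else 0
def compScoreF (c : Char) : Int :=
  if c = ')' then 1 else if c = ']' then 2 else if c = '}' then 3 else if c = '>' then 4 else 0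

-- ===== PORT A =====
-- corruptedScore: stack of openers; head = top. On a pop of the empty stack or a
-- mismatched non-closer Python raises (IndexError/KeyError) — those inputs are outside
-- Pre_day10; the port returns a default there (0 / corrScoreF's default 0).
def corrA : List Char → List Char → Int
  | _, [] => 0
  | stack, c :: cs =>
    if isOpenB c then corrA (c :: stack) cs
    else
      match stack with
      | [] => 0
      | o :: st => if c = pairsF o then corrA st cs else corrScoreF c

-- completionScore's first loop: the final stack of openers (pop of [] : Python raises, outside Pre_)
def stackA : List Char → List Char → List Char
  | st, [] => st
  | st, c :: cs => if isOpenB c then stackA (c :: st) cs else stackA st.tail cs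

-- completionScore's while-loop over the final stack, top first
def complA (l : List Char) : Int :=
  (stackA [] l).foldl (fun score o => score * 5 + compScoreF (pairsF o)) 0

def day10 (part : Int) (input : String) : Option Int :=
  let lines := PySem.Chars.splitOn input.toList ['\n']
  if part = 1 then
    some ((lines.map (fun x => corrA [] x)).sum)
  else if part = 2 then
    let keep := lines.filter (fun x => corrA [] x == 0)
    let scores := PySem.List.sorted (keep.map (fun x => complA x)) (fun v => v) false
    some (scores.getD ((scores.length - 1) / 2) 0)
  else none

-- ===== PORT B =====
-- recursive-descent parse result (Source B's seq): 'stop rest' = stopped in front of rest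
inductive PRes where
  | stop : List Char → PRes
  | corrupt : Int → PRes
  | incomplete : Int → PRes
deriving Repr, DecidableEq

-- Source B's seq; the Nat argument is a fuel guard making the recursion structural
-- (fuel > length of the list is always enough, see lemma pendLen_seqF below)
def seqF : Nat → List Char → PRes
  | 0, s => .stop s
  | fuel + 1, s =>
    match s with
    | [] => .stop []
    | c :: cs =>
      if isOpenB c then
        match seqF fuel cs with
        | .incomplete k => .incomplete (k * 5 + compScoreF (pairsF c))
        | .corrupt k => .corrupt k
        | .stop [] => .incomplete (compScoreF (pairsF c))
        | .stop (d :: ds) => if d = pairsF c then seqF fuel ds else .corrupt (corrScoreF d)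
      else .stop s

-- Source B's analyze: (corruption score, completion score)
def analyzeB (l : List Char) : Int × Int :=
  match seqF (l.length + 1) l with
  | .corrupt k => (k, 0)
  | .incomplete k => (0, k)
  | .stop [] => (0, 0)
  | .stop (d :: _) => (corrScoreF d, 0)

def day10_alt (part : Int) (input : String) : Option Int :=
  let lines := PySem.Chars.splitOn input.toList ['\n']
  if part = 1 then
    some ((lines.map (fun l => (analyzeB l).1)).sum)
  else if part = 2 then
    let comps := PySem.List.sorted
      (lines.filterMap (fun l =>
        let p := analyzeB l
        if p.1 == 0 then some p.2 else none)) (fun v => v) false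
    some (comps.getD ((comps.length - 1) / 2) 0)
  else none

-- ===== PRECONDITION & SPEC =====
-- Pre_day10 = exactly the inputs on which Python A returns: every line must be
-- 'scannable' (over the bracket alphabet, no closer while nothing is open, and up to a
-- first mismatched closer well-nested — otherwise corruptedScore raises IndexError or
-- KeyError), and part 2 additionally needs one uncorrupted line (else scores[...]
-- raises IndexError on the empty list). Parts other than 1/2 return None: unconstrained.

-- line recognizer: the list of pending needed closers; true iff corruptedScore returns
def scanSafe : List Char → List Char → Bool
  | _, [] => true
  | st, c :: cs =>
    if isOpenB c then scanSafe (pairsF c :: st) cs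
    else
      match st with
      | [] => false
      | n :: st' => if c = n then scanSafe st' cs else isCloseB c

-- true iff the line is uncorrupted (every closer matches; corruptedScore returns 0)
def scanDone : List Char → List Char → Bool
  | _, [] => true
  | st, c :: cs =>
    if isOpenB c then scanDone (pairsF c :: st) cs
    else
      match st with
      | [] => false
      | n :: st' => c = n && scanDone st' cs

def Pre_day10 (part : Int) (input : String) : Prop :=
  (part = 1 → ∀ l ∈ PySem.Chars.splitOn input.toList ['\n'], scanSafe [] l = true) ∧
  (part = 2 →
    (∀ l ∈ PySem.Chars.splitOn input.toList ['\n'], scanSafe [] l = true) ∧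
    ∃ l ∈ PySem.Chars.splitOn input.toList ['\n'], scanDone [] l = true)

instance (part : Int) (input : String) : Decidable (Pre_day10 part input) := by
  unfold Pre_day10; infer_instance

def pvWitness_day10 : Int × String := (2, "<([]){()}\n[(()]")

def Spec_day10 (part : Int) (input : String) (out : Option Int) : Prop := out = day10_alt part input
instance (part : Int) (input : String) (out : Option Int) : Decidable (Spec_day10 part input out) := by unfold Spec_day10; infer_instance

-- ===== CLAIM (what is proved, stated in full; the proofs are below) =====
def Claim_equal_day10 : Prop := ∀ (part : Int) (input : String), Dom_day10 part input → Pre_day10 part input → Spec_day10 part input (day10 part input)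

-- ===== LEMMAS AND PROOFS =====

theorem open_pairs_not_open {c : Char} (h : isOpenB c = true) : isOpenB (pairsF c) = false := by
  simp only [isOpenB, Bool.or_eq_true, decide_eq_true_eq] at h
  rcases h with ((h | h) | h) | h <;> subst h <;> decide

theorem close_score_pos {c : Char} (h : isCloseB c = true) : 0 < corrScoreF c := by
  simp only [isCloseB, Bool.or_eq_true, decide_eq_true_eq] at h
  rcases h with ((h | h) | h) | h <;> subst h <;> decide

def pendLen : PRes → Nat
  | .stop r => r.length
  | _ => 0

theorem pendLen_seqF : ∀ (fuel : Nat) (s : List Char), pendLen (seqF fuel s) ≤ s.length := by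
  intro fuel
  induction fuel with
  | zero => intro s; simp [seqF, pendLen]
  | succ n ih =>
    intro s
    match s with
    | [] => simp [seqF, pendLen]
    | c :: cs =>
      by_cases hc : isOpenB c = true
      · have hcs := ih cs
        simp only [seqF, hc, if_true]
        cases h : seqF n cs with
        | corrupt k => simp [pendLen]
        | incomplete k => simp [pendLen]
        | stop r =>
          cases r with
          | nil => simp [pendLen]
          | cons d ds =>
            rw [h] at hcs; simp only [pendLen, List.length_cons] at hcs
            by_cases hd : d = pairsF c
            · have h1 := ih ds
              simp only [List.length_cons]
              simp [hd]
              omega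
            · simp [hd, pendLen]
      · simp [seqF, hc, pendLen]

theorem stop_head_not_open : ∀ (fuel : Nat) (s : List Char), s.length < fuel →
    ∀ d ds, seqF fuel s = .stop (d :: ds) → isOpenB d = false := by
  intro fuel
  induction fuel with
  | zero => intro s h; omega
  | succ n ih =>
    intro s hlen d ds hseq
    match s with
    | [] => simp [seqF] at hseq
    | c :: cs =>
      simp only [List.length_cons] at hlen
      by_cases hc : isOpenB c = true
      · simp only [seqF, hc, if_true] at hseq
        cases h : seqF n cs with
        | corrupt k => rw [h] at hseq; simp at hseq
        | incomplete k => rw [h] at hseq; simp at hseq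
        | stop r =>
          rw [h] at hseq
          cases r with
          | nil => simp at hseq
          | cons d' ds' =>
            by_cases hd : d' = pairsF c
            · simp only [hd, if_pos rfl] at hseq
              have hds : ds'.length < n := by
                have := pendLen_seqF n cs; rw [h] at this
                simp only [pendLen, List.length_cons] at this; omega
              exact ih ds' hds d ds hseq
            · simp [hd] at hseq
      · simp only [seqF, hc, if_false, Bool.false_eq_true, reduceIte, PRes.stop.injEq,
          List.cons.injEq] at hseq
        obtain ⟨h1, -⟩ := hseq
        subst h1
        simpa using hc

theorem stop_corr : ∀ (fuel : Nat) (s : List Char), s.length < fuel →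
    ∀ rest, seqF fuel s = .stop rest → ∀ st, corrA st s = corrA st rest := by
  intro fuel
  induction fuel with
  | zero => intro s h; omega
  | succ n ih =>
    intro s hlen rest hseq st
    match s with
    | [] =>
      simp only [seqF, PRes.stop.injEq] at hseq
      subst hseq; rfl
    | c :: cs =>
      simp only [List.length_cons] at hlen
      by_cases hc : isOpenB c = true
      · simp only [seqF, hc, if_true] at hseq
        have hcs : cs.length < n := by omega
        cases h : seqF n cs with
        | corrupt k => rw [h] at hseq; simp at hseq
        | incomplete k => rw [h] at hseq; simp at hseq
        | stop r =>
          rw [h] at hseq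
          cases r with
          | nil => simp at hseq
          | cons d ds =>
            by_cases hd : d = pairsF c
            · simp only [hd, if_pos rfl] at hseq
              have hds : ds.length < n := by
                have := pendLen_seqF n cs; rw [h] at this
                simp only [pendLen, List.length_cons] at this; omega
              have e1 : corrA st (c :: cs) = corrA (c :: st) cs := by simp [corrA, hc]
              have e2 := ih cs hcs _ h (c :: st)
              have e3 : corrA (c :: st) (pairsF c :: ds) = corrA st ds := by
                simp [corrA, open_pairs_not_open hc]
              have e4 := ih ds hds _ hseq st
              rw [e1, e2, hd, e3, e4]
            · simp [hd] at hseq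
      · simp only [seqF, hc, if_false, Bool.false_eq_true, reduceIte, PRes.stop.injEq] at hseq
        subst hseq; rfl

theorem corrupt_corr : ∀ (fuel : Nat) (s : List Char), s.length < fuel →
    ∀ k, seqF fuel s = .corrupt k → ∀ st, corrA st s = k := by
  intro fuel
  induction fuel with
  | zero => intro s h; omega
  | succ n ih =>
    intro s hlen k hseq st
    match s with
    | [] => simp [seqF] at hseq
    | c :: cs =>
      simp only [List.length_cons] at hlen
      by_cases hc : isOpenB c = true
      · simp only [seqF, hc, if_true] at hseq
        have hcs : cs.length < n := by omega
        have e1 : corrA st (c :: cs) = corrA (c :: st) cs := by simp [corrA, hc]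
        cases h : seqF n cs with
        | incomplete k' => rw [h] at hseq; simp at hseq
        | corrupt k' =>
          rw [h] at hseq
          simp only [PRes.corrupt.injEq] at hseq
          subst hseq
          rw [e1]; exact ih cs hcs _ h (c :: st)
        | stop r =>
          rw [h] at hseq
          cases r with
          | nil => simp at hseq
          | cons d ds =>
            have hds : ds.length < n := by
              have := pendLen_seqF n cs; rw [h] at this
              simp only [pendLen, List.length_cons] at this; omega
            have hdo : isOpenB d = false := stop_head_not_open n cs hcs d ds h
            by_cases hd : d = pairsF c
            · simp only [hd, if_pos rfl] at hseq
              have e2 := stop_corr n cs hcs _ h (c :: st)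
              have e3 : corrA (c :: st) (pairsF c :: ds) = corrA st ds := by
                simp [corrA, open_pairs_not_open hc]
              rw [e1, e2, hd, e3]; exact ih ds hds _ hseq st
            · simp only [hd, if_neg, PRes.corrupt.injEq, reduceIte] at hseq
              subst hseq
              have e2 := stop_corr n cs hcs _ h (c :: st)
              rw [e1, e2]
              simp [corrA, hdo, hd]
      · simp [seqF, hc] at hseq

theorem incomplete_corr : ∀ (fuel : Nat) (s : List Char), s.length < fuel →
    ∀ k, seqF fuel s = .incomplete k → ∀ st, corrA st s = 0 := by
  intro fuel
  induction fuel with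
  | zero => intro s h; omega
  | succ n ih =>
    intro s hlen k hseq st
    match s with
    | [] => simp [seqF] at hseq
    | c :: cs =>
      simp only [List.length_cons] at hlen
      by_cases hc : isOpenB c = true
      · simp only [seqF, hc, if_true] at hseq
        have hcs : cs.length < n := by omega
        have e1 : corrA st (c :: cs) = corrA (c :: st) cs := by simp [corrA, hc]
        cases h : seqF n cs with
        | corrupt k' => rw [h] at hseq; simp at hseq
        | incomplete k' =>
          rw [e1]; exact ih cs hcs _ h (c :: st)
        | stop r =>
          rw [h] at hseq
          cases r with
          | nil =>
            have e2 := stop_corr n cs hcs _ h (c :: st)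
            rw [e1, e2]; rfl
          | cons d ds =>
            have hds : ds.length < n := by
              have := pendLen_seqF n cs; rw [h] at this
              simp only [pendLen, List.length_cons] at this; omega
            by_cases hd : d = pairsF c
            · simp only [hd, if_pos rfl] at hseq
              have e2 := stop_corr n cs hcs _ h (c :: st)
              have e3 : corrA (c :: st) (pairsF c :: ds) = corrA st ds := by
                simp [corrA, open_pairs_not_open hc]
              rw [e1, e2, hd, e3]; exact ih ds hds _ hseq st
            · simp [hd] at hseq
      · simp [seqF, hc] at hseq

theorem stop_stack : ∀ (fuel : Nat) (s : List Char), s.length < fuel →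
    ∀ rest, seqF fuel s = .stop rest → ∀ st, stackA st s = stackA st rest := by
  intro fuel
  induction fuel with
  | zero => intro s h; omega
  | succ n ih =>
    intro s hlen rest hseq st
    match s with
    | [] =>
      simp only [seqF, PRes.stop.injEq] at hseq
      subst hseq; rfl
    | c :: cs =>
      simp only [List.length_cons] at hlen
      by_cases hc : isOpenB c = true
      · simp only [seqF, hc, if_true] at hseq
        have hcs : cs.length < n := by omega
        cases h : seqF n cs with
        | corrupt k => rw [h] at hseq; simp at hseq
        | incomplete k => rw [h] at hseq; simp at hseq
        | stop r =>
          rw [h] at hseq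
          cases r with
          | nil => simp at hseq
          | cons d ds =>
            by_cases hd : d = pairsF c
            · simp only [hd, if_pos rfl] at hseq
              have hds : ds.length < n := by
                have := pendLen_seqF n cs; rw [h] at this
                simp only [pendLen, List.length_cons] at this; omega
              have e1 : stackA st (c :: cs) = stackA (c :: st) cs := by simp [stackA, hc]
              have e2 := ih cs hcs _ h (c :: st)
              have e3 : stackA (c :: st) (pairsF c :: ds) = stackA st ds := by
                simp [stackA, open_pairs_not_open hc]
              have e4 := ih ds hds _ hseq st
              rw [e1, e2, hd, e3, e4]
            · simp [hd] at hseq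
      · simp only [seqF, hc, if_false, Bool.false_eq_true, reduceIte, PRes.stop.injEq] at hseq
        subst hseq; rfl

theorem incomplete_stack : ∀ (fuel : Nat) (s : List Char), s.length < fuel →
    ∀ k, seqF fuel s = .incomplete k → ∀ st, ∃ ns, stackA st s = ns ++ st ∧
      ns.foldl (fun score o => score * 5 + compScoreF (pairsF o)) 0 = k := by
  intro fuel
  induction fuel with
  | zero => intro s h; omega
  | succ n ih =>
    intro s hlen k hseq st
    match s with
    | [] => simp [seqF] at hseq
    | c :: cs =>
      simp only [List.length_cons] at hlen
      by_cases hc : isOpenB c = true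
      · simp only [seqF, hc, if_true] at hseq
        have hcs : cs.length < n := by omega
        have e1 : stackA st (c :: cs) = stackA (c :: st) cs := by simp [stackA, hc]
        cases h : seqF n cs with
        | corrupt k' => rw [h] at hseq; simp at hseq
        | incomplete k' =>
          rw [h] at hseq
          simp only [PRes.incomplete.injEq] at hseq
          obtain ⟨ns', hst, hfold⟩ := ih cs hcs k' h (c :: st)
          refine ⟨ns' ++ [c], ?_, ?_⟩
          · rw [e1, hst]; simp
          · rw [List.foldl_append]; simp [hfold, hseq]
        | stop r =>
          rw [h] at hseq
          cases r with
          | nil =>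
            simp only [PRes.incomplete.injEq] at hseq
            have e2 := stop_stack n cs hcs _ h (c :: st)
            refine ⟨[c], ?_, ?_⟩
            · rw [e1, e2]; rfl
            · simp [hseq]
          | cons d ds =>
            by_cases hd : d = pairsF c
            · simp only [hd, if_pos rfl] at hseq
              have hds : ds.length < n := by
                have := pendLen_seqF n cs; rw [h] at this
                simp only [pendLen, List.length_cons] at this; omega
              have e2 := stop_stack n cs hcs _ h (c :: st)
              have e3 : stackA (c :: st) (pairsF c :: ds) = stackA st ds := by
                simp [stackA, open_pairs_not_open hc]
              obtain ⟨ns, hst, hfold⟩ := ih ds hds _ hseq st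
              exact ⟨ns, by rw [e1, e2, hd, e3, hst], hfold⟩
            · simp [hd] at hseq
      · simp [seqF, hc] at hseq

theorem stop_safe : ∀ (fuel : Nat) (s : List Char), s.length < fuel →
    ∀ rest, seqF fuel s = .stop rest → ∀ st, scanSafe st s = scanSafe st rest := by
  intro fuel
  induction fuel with
  | zero => intro s h; omega
  | succ n ih =>
    intro s hlen rest hseq st
    match s with
    | [] =>
      simp only [seqF, PRes.stop.injEq] at hseq
      subst hseq; rfl
    | c :: cs =>
      simp only [List.length_cons] at hlen
      by_cases hc : isOpenB c = true
      · simp only [seqF, hc, if_true] at hseq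
        have hcs : cs.length < n := by omega
        cases h : seqF n cs with
        | corrupt k => rw [h] at hseq; simp at hseq
        | incomplete k => rw [h] at hseq; simp at hseq
        | stop r =>
          rw [h] at hseq
          cases r with
          | nil => simp at hseq
          | cons d ds =>
            by_cases hd : d = pairsF c
            · simp only [hd, if_pos rfl] at hseq
              have hds : ds.length < n := by
                have := pendLen_seqF n cs; rw [h] at this
                simp only [pendLen, List.length_cons] at this; omega
              have e1 : scanSafe st (c :: cs) = scanSafe (pairsF c :: st) cs := by
                simp [scanSafe, hc]
              have e2 := ih cs hcs _ h (pairsF c :: st)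
              have e3 : scanSafe (pairsF c :: st) (pairsF c :: ds) = scanSafe st ds := by
                simp [scanSafe, open_pairs_not_open hc]
              have e4 := ih ds hds _ hseq st
              rw [e1, e2, hd, e3, e4]
            · simp [hd] at hseq
      · simp only [seqF, hc, if_false, Bool.false_eq_true, reduceIte, PRes.stop.injEq] at hseq
        subst hseq; rfl

theorem corrupt_pos : ∀ (fuel : Nat) (s : List Char), s.length < fuel →
    ∀ st, scanSafe st s = true → ∀ k, seqF fuel s = .corrupt k → 0 < k := by
  intro fuel
  induction fuel with
  | zero => intro s h; omega
  | succ n ih =>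
    intro s hlen st hs k hseq
    match s with
    | [] => simp [seqF] at hseq
    | c :: cs =>
      simp only [List.length_cons] at hlen
      by_cases hc : isOpenB c = true
      · simp only [seqF, hc, if_true] at hseq
        have hcs : cs.length < n := by omega
        have hs' : scanSafe (pairsF c :: st) cs = true := by
          simpa [scanSafe, hc] using hs
        cases h : seqF n cs with
        | incomplete k' => rw [h] at hseq; simp at hseq
        | corrupt k' =>
          rw [h] at hseq
          simp only [PRes.corrupt.injEq] at hseq
          subst hseq
          exact ih cs hcs _ hs' _ h
        | stop r =>
          rw [h] at hseq
          cases r with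
          | nil => simp at hseq
          | cons d ds =>
            have hdo : isOpenB d = false := stop_head_not_open n cs hcs d ds h
            have e2 := stop_safe n cs hcs _ h (pairsF c :: st)
            by_cases hd : d = pairsF c
            · simp only [hd, if_pos rfl] at hseq
              have hds : ds.length < n := by
                have := pendLen_seqF n cs; rw [h] at this
                simp only [pendLen, List.length_cons] at this; omega
              have hs'' : scanSafe st ds = true := by
                rw [e2, hd] at hs'
                simpa [scanSafe, open_pairs_not_open hc] using hs'
              exact ih ds hds _ hs'' _ hseq
            · simp only [hd, reduceIte, PRes.corrupt.injEq] at hseq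
              subst hseq
              rw [e2] at hs'
              have : isCloseB d = true := by
                simpa [scanSafe, hdo, hd] using hs'
              exact close_score_pos this
      · simp [seqF, hc] at hseq

theorem line_corr (l : List Char) (hs : scanSafe [] l = true) : corrA [] l = (analyzeB l).1 := by
  have hlen : l.length < l.length + 1 := Nat.lt_succ_self _
  cases h : seqF (l.length + 1) l with
  | corrupt k =>
    rw [corrupt_corr _ l hlen _ h []]
    simp [analyzeB, h]
  | incomplete k =>
    rw [incomplete_corr _ l hlen _ h []]
    simp [analyzeB, h]
  | stop r =>
    cases r with
    | nil =>
      rw [stop_corr _ l hlen _ h []]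
      simp [analyzeB, h, corrA]
    | cons d ds =>
      exfalso
      have := stop_safe _ l hlen _ h []
      rw [hs] at this
      have hdo := stop_head_not_open _ l hlen d ds h
      simp [scanSafe, hdo] at this

theorem line_comp (l : List Char) (hs : scanSafe [] l = true) (h0 : (analyzeB l).1 = 0) :
    complA l = (analyzeB l).2 := by
  have hlen : l.length < l.length + 1 := Nat.lt_succ_self _
  cases h : seqF (l.length + 1) l with
  | corrupt k =>
    exfalso
    have hk := corrupt_pos _ l hlen [] hs _ h
    have : (analyzeB l).1 = k := by simp [analyzeB, h]
    omega
  | incomplete k =>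
    obtain ⟨ns, hst, hfold⟩ := incomplete_stack _ l hlen _ h []
    unfold complA
    rw [hst]
    simp only [List.append_nil]
    rw [hfold]
    simp [analyzeB, h]
  | stop r =>
    cases r with
    | nil =>
      unfold complA
      rw [stop_stack _ l hlen _ h []]
      simp [analyzeB, h, stackA]
    | cons d ds =>
      exfalso
      have := stop_safe _ l hlen _ h []
      rw [hs] at this
      have hdo := stop_head_not_open _ l hlen d ds h
      simp [scanSafe, hdo] at this

theorem part2_list : ∀ (ls : List (List Char)), (∀ l ∈ ls, scanSafe [] l = true) →
    ((ls.filter (fun x => corrA [] x == 0)).map (fun x => complA x))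
      = ls.filterMap (fun l =>
          let p := analyzeB l
          if p.1 == 0 then some p.2 else none) := by
  intro ls
  induction ls with
  | nil => intro _; rfl
  | cons l rest ih =>
    intro h
    have hl : scanSafe [] l = true := h l (List.mem_cons_self)
    have hrest := ih (fun x hx => h x (List.mem_cons_of_mem _ hx))
    have hc := line_corr l hl
    simp only [List.filter_cons, List.filterMap_cons]
    by_cases h0 : (analyzeB l).1 = 0
    · have hb : (corrA [] l == 0) = true := by rw [hc]; simp [h0]
      rw [hb]
      simp only [h0, beq_self_eq_true, if_pos, if_true]
      rw [List.map_cons, hrest, line_comp l hl h0]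
    · have hb : (corrA [] l == 0) = false := by rw [hc]; simpa using h0
      rw [hb]
      have hb2 : ((analyzeB l).1 == 0) = false := by simpa using h0
      simp only [hb2, Bool.false_eq_true, if_false]
      exact hrest

-- ===== VERDICT (by name: the statement is the Claim_ definition above) =====
theorem day10_spec : Claim_equal_day10 := by
  intro part input _ hpre
  unfold Spec_day10 day10 day10_alt
  rcases hpre with ⟨h1, h2⟩
  by_cases hp1 : part = 1
  · simp only [hp1]
    have := h1 hp1
    exact congrArg (fun z => some z)
      (congrArg List.sum (List.map_congr_left (fun l hl => line_corr l (this l hl))))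
  · by_cases hp2 : part = 2
    · obtain ⟨hsafe, -⟩ := h2 hp2
      simp only [hp2, if_neg (by norm_num : (2:Int) ≠ 1)]
      rw [part2_list _ hsafe]
    · simp [hp1, hp2]
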